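-- pv_equiv track=rewrite | github.com/11aman11/A-wrk | foo-copy.py | validate_expression_format
-- ===== SOURCE A (Python) =====
-- def validate_expression_format(expression):
--     """Basic validation of expression format. Returns True if valid, False otherwise."""
--     # Check balanced brackets and parentheses
--     if expression.count('[') != expression.count(']'):
--         return False
--     if expression.count('(') != expression.count(')'):
--         return False
--
--     # Check for operators without brackets
--     for op in ["&&", "||", "&", "|"]:
--         i = 0
--         while i < len(expression):
--             i = expression.find(op, i)
--             if i == -1:
--                 break
--
--             # Skip if part of another operator
--             if op in ["&", "|"] and i+1 < len(expression) and expression[i+1] == expression[i]: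
--                 i += 1
--                 continue
--
--             # Find next non-whitespace character
--             j = i + len(op)
--             while j < len(expression) and expression[j].isspace():
--                 j += 1
--
--             if j >= len(expression) or expression[j] != '[':
--                 return False
--
--             i += len(op)
--
--     return True
-- ===== SOURCE B (Python) =====
-- def validate_expression_format(expression):
--     """Basic validation of expression format. Returns True if valid, False otherwise."""
--     n = len(expression)
--     brackets = parens = 0
--     for i, c in enumerate(expression):
--         if c == '[':
--             brackets += 1
--         elif c == ']':
--             brackets -= 1
--         elif c == '(':
--             parens += 1
--         elif c == ')':
--             parens -= 1
--         elif c == '&' or c == '|':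
--             j = i + 2 if i + 1 < n and expression[i + 1] == c else i + 1
--             while j < n and expression[j].isspace():
--                 j += 1
--             if j >= n or expression[j] != '[':
--                 return False
--     return brackets == 0 and parens == 0
-- ===== Notes on version B (the rewrite author's own statement) =====
-- stated objective: simpler
-- what changed: A makes four separate find-based passes over the string, one per operator form (doubled and single and/or), after two count passes; B is a single left-to-right scan with running bracket and paren counters that checks each operator occurrence in place, classifying it as doubled or single by one look-ahead.
import Mathlib
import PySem

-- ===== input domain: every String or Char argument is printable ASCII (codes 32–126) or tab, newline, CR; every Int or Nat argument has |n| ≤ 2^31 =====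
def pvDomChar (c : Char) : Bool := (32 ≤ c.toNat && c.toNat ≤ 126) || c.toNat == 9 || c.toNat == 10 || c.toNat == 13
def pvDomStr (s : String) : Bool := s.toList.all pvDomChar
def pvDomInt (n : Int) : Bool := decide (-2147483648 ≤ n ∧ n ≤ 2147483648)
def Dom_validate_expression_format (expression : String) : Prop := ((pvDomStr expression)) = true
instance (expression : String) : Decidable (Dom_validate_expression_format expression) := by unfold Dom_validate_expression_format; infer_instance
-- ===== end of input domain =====

-- B replaces A's four separate find-based operator passes by a single left-to-right scan
-- that keeps running bracket/paren counters and checks each '&'/'|' occurrence in place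
-- (objective: simpler -- one pass, one loop).

-- ===== PORT A =====
-- A's inner whitespace skip: 'while j < len(expression) and expression[j].isspace(): j += 1'
def pvSkipWsA (s : List Char) (j : Nat) : Nat :=
  if h : j < s.length then
    if PySem.Chars.isspace s[j] then pvSkipWsA s (j + 1) else j
  else j
termination_by s.length - j

-- A's 'while i < len(expression)' loop for one operator op, ported step for step.
-- The index strictly increases each iteration, so fuel = s.length + 1 makes the
-- recursion structural without changing any computed value.
def pvALoop (s op : List Char) (fuel i : Nat) : Bool :=
  match fuel with
  | 0 => true
  | fuel + 1 =>
    if i < s.length then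
      -- i = expression.find(op, i)
      let f := PySem.Chars.findFrom s op (i : Int)
      if f = -1 then true
      else
        let p := f.toNat
        -- skip if part of another operator
        if (op = ['&'] ∨ op = ['|']) ∧ p + 1 < s.length ∧ s[p+1]? = s[p]? then
          pvALoop s op fuel (p + 1)
        else
          -- find next non-whitespace character
          let j := pvSkipWsA s (p + op.length)
          if s.length ≤ j ∨ s[j]? ≠ some '[' then false
          else pvALoop s op fuel (p + op.length)
    else true

def validate_expression_format (expression : String) : Bool :=
  let s := expression.toList
  if PySem.Chars.count s ['['] ≠ PySem.Chars.count s [']'] then false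
  else if PySem.Chars.count s ['('] ≠ PySem.Chars.count s [')'] then false
  else
    -- for op in ["&&", "||", "&", "|"]: run the while loop; any failure returns False
    [['&','&'], ['|','|'], ['&'], ['|']].all fun op => pvALoop s op (s.length + 1) 0

-- ===== PORT B =====
-- B's whitespace skip: 'while j < n and expression[j].isspace(): j += 1'
def pvSkipWsB (s : List Char) (j : Nat) : Nat :=
  if h : j < s.length then
    if PySem.Chars.isspace s[j] then pvSkipWsB s (j + 1) else j
  else j
termination_by s.length - j

-- B's single 'for i, c in enumerate(expression)' scan with running counters
def pvBLoop (s : List Char) (i : Nat) (br pa : Int) : Bool :=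
  if h : i < s.length then
    let c := s[i]
    if c = '[' then pvBLoop s (i + 1) (br + 1) pa
    else if c = ']' then pvBLoop s (i + 1) (br - 1) pa
    else if c = '(' then pvBLoop s (i + 1) br (pa + 1)
    else if c = ')' then pvBLoop s (i + 1) br (pa - 1)
    else if c = '&' ∨ c = '|' then
      let j0 := if i + 1 < s.length ∧ s[i+1]? = some c then i + 2 else i + 1
      let j := pvSkipWsB s j0
      if s.length ≤ j ∨ s[j]? ≠ some '[' then false
      else pvBLoop s (i + 1) br pa
    else pvBLoop s (i + 1) br pa
  else decide (br = 0) && decide (pa = 0)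
termination_by s.length - i

def validate_expression_format_alt (expression : String) : Bool :=
  pvBLoop expression.toList 0 0 0

-- ===== PRECONDITION & SPEC =====
def Spec_validate_expression_format (expression : String) (out : Bool) : Prop := out = validate_expression_format_alt expression
instance (expression : String) (out : Bool) : Decidable (Spec_validate_expression_format expression out) := by unfold Spec_validate_expression_format; infer_instance

-- ===== CLAIM (what is proved, stated in full; the proofs are below) =====
def Claim_equal_validate_expression_format : Prop := ∀ (expression : String), Dom_validate_expression_format expression → Spec_validate_expression_format expression (validate_expression_format expression)

-- ===== LEMMAS AND PROOFS =====

-- "the next non-whitespace character at or after j exists and is '['"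
def pvCheck (s : List Char) (j : Nat) : Prop :=
  pvSkipWsA s j < s.length ∧ s[pvSkipWsA s j]? = some '['

-- every doubled operator occurrence at or after i passes the check
def pvPairOKs (s : List Char) (c : Char) (i : Nat) : Prop :=
  ∀ p, i ≤ p → [c, c] <+: s.drop p → pvCheck s (p + 2)

-- every single (not doubled) operator occurrence at or after i passes the check
def pvLoneOKs (s : List Char) (c : Char) (i : Nat) : Prop :=
  ∀ p, i ≤ p → s[p]? = some c → ¬ [c, c] <+: s.drop p → pvCheck s (p + 1)

-- B's per-position operator rule from position i on
def pvRulesOKs (s : List Char) (i : Nat) : Prop :=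
  ∀ p, i ≤ p → ∀ c, s[p]? = some c → (c = '&' ∨ c = '|') →
    pvCheck s (if p + 1 < s.length ∧ s[p+1]? = some c then p + 2 else p + 1)

theorem pvPrefix_one (t : List Char) (c : Char) : [c] <+: t ↔ t[0]? = some c := by
  cases t with
  | nil => simp
  | cons h tl => simp [List.cons_prefix_cons, eq_comm]

theorem pvPrefix_two (t : List Char) (c : Char) : [c, c] <+: t ↔ t[0]? = some c ∧ t[1]? = some c := by
  cases t with
  | nil => simp
  | cons h tl =>
    cases tl with
    | nil => simp [List.cons_prefix_cons]
    | cons h2 tl2 => simp [List.cons_prefix_cons, eq_comm, and_comm]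

theorem pvPrefix_one_drop (s : List Char) (p : Nat) (c : Char) :
    [c] <+: s.drop p ↔ s[p]? = some c := by
  rw [pvPrefix_one]; simp [List.getElem?_drop]

theorem pvPrefix_two_drop (s : List Char) (p : Nat) (c : Char) :
    [c, c] <+: s.drop p ↔ s[p]? = some c ∧ s[p + 1]? = some c := by
  rw [pvPrefix_two]; simp [List.getElem?_drop]

theorem pvSkipWsB_eq (s : List Char) (j : Nat) : pvSkipWsB s j = pvSkipWsA s j := by
  fun_induction pvSkipWsB s j with
  | case1 j h hws ih => rw [ih]; conv_rhs => rw [pvSkipWsA]; simp [h, hws]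
  | case2 j h hws => rw [pvSkipWsA]; simp [h, hws]
  | case3 j h => rw [pvSkipWsA]; simp [h]

theorem pvSkipWsA_stop (s : List Char) (j : Nat) (ch : Char)
    (h : s[j]? = some ch) (hws : PySem.Chars.isspace ch = false) : pvSkipWsA s j = j := by
  have hj : j < s.length := by
    by_contra hc
    simp [List.getElem?_eq_none (by omega : s.length ≤ j)] at h
  rw [pvSkipWsA]
  have : s[j] = ch := by
    have := List.getElem?_eq_getElem hj
    rw [this] at h; exact Option.some.inj h
  simp [hj, this, hws]

-- a position that passes the check cannot hold an operator character
theorem pvCheck_no_op (s : List Char) (j : Nat) (c : Char) (hc : c = '&' ∨ c = '|')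
    (h : pvCheck s j) : s[j]? ≠ some c := by
  intro hj
  have hws : PySem.Chars.isspace c = false := by rcases hc with rfl | rfl <;> decide
  have hstop := pvSkipWsA_stop s j c hj hws
  rcases h with ⟨_, h2⟩
  rw [hstop] at h2
  rw [hj] at h2
  rcases hc with rfl | rfl <;> simp at h2

theorem pvDrop_drop_eq (s : List Char) (i p : Nat) (h : i ≤ p) :
    (s.drop i).drop (p - i) = s.drop p := by
  rw [List.drop_drop]; congr 1; omega

theorem pvNoOcc_of_find_none (s sub : List Char) (i : Nat)
    (h : ¬ sub <:+: s.drop i) : ∀ p, i ≤ p → ¬ sub <+: s.drop p := by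
  intro p hp hpre
  rw [← pvDrop_drop_eq s i p hp] at hpre
  exact h (hpre.isInfix.trans (List.drop_suffix _ _).isInfix)

theorem pvALoop_pair (s : List Char) (c : Char) (hc : c = '&' ∨ c = '|') :
    ∀ fuel i, s.length - i < fuel → (pvALoop s [c, c] fuel i = true ↔ pvPairOKs s c i) := by
  intro fuel
  induction fuel with
  | zero => intro i h; exact absurd h (by omega)
  | succ fuel ih =>
    intro i hfuel
    simp only [pvALoop]
    by_cases hi : i < s.length
    case neg =>
      rw [if_neg hi]
      simp only [true_iff]
      intro p hp hpre
      exact absurd hpre (by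
        rw [List.drop_of_length_le (by omega : s.length ≤ p)]
        simp)
    case pos =>
      rw [if_pos hi]
      by_cases hf : PySem.Chars.findFrom s [c, c] (i : Int) = -1
      · rw [if_pos hf]
        simp only [true_iff]
        have hno := pvNoOcc_of_find_none s [c, c] i
          ((PySem.Chars.findFrom_natCast_eq_neg_one_iff s [c, c] i (by omega)).mp hf)
        intro p hp hpre
        exact absurd hpre (hno p hp)
      · rw [if_neg hf]
        obtain ⟨hle, hpre, hmin⟩ :=
          PySem.Chars.findFrom_natCast_spec s [c, c] i (by omega) hf
        set p := (PySem.Chars.findFrom s [c, c] (i : Int)).toNat with hp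
        have hip : i ≤ p := by omega
        have hp2 : p + 2 ≤ s.length := by
          have := hpre.length_le
          simp only [List.length_cons, List.length_nil, List.length_drop] at this
          omega
        rw [if_neg (by simp)]
        simp only [List.length_cons, List.length_nil]
        have hlen2 : p + (0 + 1 + 1) = p + 2 := by omega
        rw [hlen2]
        by_cases hch : pvCheck s (p + 2)
        · rw [if_neg (by rcases hch with ⟨a, b⟩; push_neg; exact ⟨a, b⟩)]
          rw [ih (p + 2) (by omega)]
          constructor
          · intro H q hq hqpre
            rcases Nat.lt_or_ge q p with h2 | h2
            · exact absurd hqpre (hmin q hq h2)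
            · rcases Nat.lt_or_ge q (p + 2) with h3 | h3
              · rcases (by omega : q = p ∨ q = p + 1) with rfl | rfl
                · exact hch
                · exfalso
                  have := (pvPrefix_two_drop s (p + 1) c).mp hqpre
                  have h21 : p + 1 + 1 = p + 2 := by omega
                  rw [h21] at this
                  exact pvCheck_no_op s (p + 2) c hc hch this.2
              · exact H q h3 hqpre
          · intro H q hq hqpre
            exact H q (by omega) hqpre
        · rw [if_pos (by
            by_contra hcon
            push_neg at hcon
            exact hch ⟨hcon.1, hcon.2⟩)]
          simp only [Bool.false_eq_true, false_iff]
          intro H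
          exact hch (H p hip hpre)

theorem pvALoop_lone (s : List Char) (c : Char) (hc : c = '&' ∨ c = '|') :
    ∀ fuel i, s.length - i < fuel → (pvALoop s [c] fuel i = true ↔ pvLoneOKs s c i) := by
  intro fuel
  induction fuel with
  | zero => intro i h; exact absurd h (by omega)
  | succ fuel ih =>
    intro i hfuel
    simp only [pvALoop]
    by_cases hi : i < s.length
    case neg =>
      rw [if_neg hi]
      simp only [true_iff]
      intro p hp hpc hnp
      exact absurd hpc (by simp [List.getElem?_eq_none (by omega : s.length ≤ p)])
    case pos =>
      rw [if_pos hi]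
      by_cases hf : PySem.Chars.findFrom s [c] (i : Int) = -1
      · rw [if_pos hf]
        simp only [true_iff]
        have hno := pvNoOcc_of_find_none s [c] i
          ((PySem.Chars.findFrom_natCast_eq_neg_one_iff s [c] i (by omega)).mp hf)
        intro p hp hpc hnp
        exact absurd ((pvPrefix_one_drop s p c).mpr hpc) (hno p hp)
      · rw [if_neg hf]
        obtain ⟨hle, hpre, hmin⟩ :=
          PySem.Chars.findFrom_natCast_spec s [c] i (by omega) hf
        set p := (PySem.Chars.findFrom s [c] (i : Int)).toNat with hp
        have hip : i ≤ p := by omega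
        have hpc : s[p]? = some c := (pvPrefix_one_drop s p c).mp hpre
        have hplt : p < s.length := by
          rcases List.getElem?_eq_some_iff.mp hpc with ⟨h', -⟩; exact h'
        have hguard : [c] = ['&'] ∨ [c] = ['|'] := by
          rcases hc with rfl | rfl
          · exact Or.inl rfl
          · exact Or.inr rfl
        have hminc : ∀ q, i ≤ q → q < p → s[q]? ≠ some c := by
          intro q hq1 hq2 hqc
          exact hmin q hq1 hq2 ((pvPrefix_one_drop s q c).mpr hqc)
        by_cases hpair : p + 1 < s.length ∧ s[p + 1]? = s[p]?
        · rw [if_pos ⟨hguard, hpair.1, hpair.2⟩]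
          rw [ih (p + 1) (by omega)]
          have hp1c : s[p + 1]? = some c := by rw [hpair.2, hpc]
          constructor
          · intro H q hq hqc hqnp
            rcases Nat.lt_or_ge q p with h2 | h2
            · exact absurd hqc (hminc q hq h2)
            · rcases Nat.lt_or_ge q (p + 1) with h3 | h3
              · have : q = p := by omega
                subst this
                exact absurd ((pvPrefix_two_drop s p c).mpr ⟨hqc, hp1c⟩) hqnp
              · exact H q h3 hqc hqnp
          · intro H q hq hqc hqnp
            exact H q (by omega) hqc hqnp
        · rw [if_neg (fun h => hpair ⟨h.2.1, h.2.2⟩)]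
          simp only [List.length_cons, List.length_nil]
          have hlen1 : p + (0 + 1) = p + 1 := by omega
          rw [hlen1]
          have hnp : ¬ [c, c] <+: s.drop p := by
            intro h2
            have := (pvPrefix_two_drop s p c).mp h2
            rcases List.getElem?_eq_some_iff.mp this.2 with ⟨hlt2, -⟩
            exact hpair ⟨hlt2, by rw [this.2, hpc]⟩
          by_cases hch : pvCheck s (p + 1)
          · rw [if_neg (by rcases hch with ⟨a, b⟩; push_neg; exact ⟨a, b⟩)]
            rw [ih (p + 1) (by omega)]
            constructor
            · intro H q hq hqc hqnp
              rcases Nat.lt_or_ge q p with h2 | h2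
              · exact absurd hqc (hminc q hq h2)
              · rcases Nat.lt_or_ge q (p + 1) with h3 | h3
                · have : q = p := by omega
                  subst this
                  exact hch
                · exact H q h3 hqc hqnp
            · intro H q hq hqc hqnp
              exact H q (by omega) hqc hqnp
          · rw [if_pos (by
              by_contra hcon
              push_neg at hcon
              exact hch ⟨hcon.1, hcon.2⟩)]
            simp only [Bool.false_eq_true, false_iff]
            intro H
            exact hch (H p hip hpc hnp)

theorem pvCount_step (s : List Char) (i : Nat) (h : i < s.length) (c : Char) :
    ((s.drop i).count c : Int)
      = (if s[i] = c then 1 else 0) + ((s.drop (i + 1)).count c : Int) := by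
  rw [List.drop_eq_getElem_cons h]
  simp only [List.count_cons, beq_iff_eq]
  push_cast
  by_cases hq : s[i] = c
  · simp [hq]; ring
  · simp [hq, Ne.symm hq]

theorem pvRules_shift (s : List Char) (i : Nat)
    (h : ∀ c, s[i]? = some c → (c = '&' ∨ c = '|') →
      pvCheck s (if i + 1 < s.length ∧ s[i+1]? = some c then i + 2 else i + 1)) :
    pvRulesOKs s i ↔ pvRulesOKs s (i + 1) := by
  constructor
  · intro H p hp c hpc hc; exact H p (by omega) c hpc hc
  · intro H p hp c hpc hc
    rcases Nat.lt_or_ge i p with hlt | hge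
    · exact H p (by omega) c hpc hc
    · have hpi : p = i := by omega
      subst hpi; exact h c hpc hc

theorem pvBLoop_spec (s : List Char) : ∀ n i br pa, s.length - i < n →
    (pvBLoop s i br pa = true ↔
      (pvRulesOKs s i ∧ br + ((s.drop i).count '[' : Int) - ((s.drop i).count ']' : Int) = 0
        ∧ pa + ((s.drop i).count '(' : Int) - ((s.drop i).count ')' : Int) = 0)) := by
  intro n
  induction n with
  | zero => intro i br pa h; exact absurd h (by omega)
  | succ n ih =>
    intro i br pa hn
    rw [pvBLoop]
    by_cases hi : i < s.length
    · simp only [dif_pos hi]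
      have hrec : ∀ br pa : Int, pvBLoop s (i + 1) br pa = true ↔ _ :=
        fun br pa => ih (i + 1) br pa (by omega)
      have hvac : ∀ c₀ : Char, s[i] = c₀ → ¬(c₀ = '&' ∨ c₀ = '|') →
          (∀ c, s[i]? = some c → (c = '&' ∨ c = '|') →
            pvCheck s (if i + 1 < s.length ∧ s[i+1]? = some c then i + 2 else i + 1)) := by
        intro c₀ he hno c hc2 hop
        rw [List.getElem?_eq_getElem hi] at hc2
        injection hc2 with e
        rw [← e, he] at hop
        exact absurd hop hno
      have hns : ∀ c₀ : Char, ¬s[i] = c₀ →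
          ((s.drop i).count c₀ : Int) = ((s.drop (i + 1)).count c₀ : Int) := by
        intro c₀ hne
        rw [pvCount_step s i hi c₀, if_neg hne]; ring
      by_cases h1 : s[i] = '['
      · rw [if_pos h1, hrec,
          pvRules_shift s i (hvac '[' h1 (by decide)),
          pvCount_step s i hi '[', pvCount_step s i hi ']',
          pvCount_step s i hi '(', pvCount_step s i hi ')']
        rw [if_pos h1, if_neg (by rw [h1]; decide), if_neg (by rw [h1]; decide),
          if_neg (by rw [h1]; decide)]
        constructor <;> rintro ⟨a, b, c⟩ <;> exact ⟨a, by omega, by omega⟩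
      · rw [if_neg h1]
        by_cases h2 : s[i] = ']'
        · rw [if_pos h2, hrec,
            pvRules_shift s i (hvac ']' h2 (by decide)),
            pvCount_step s i hi '[', pvCount_step s i hi ']',
            pvCount_step s i hi '(', pvCount_step s i hi ')']
          rw [if_neg h1, if_pos h2, if_neg (by rw [h2]; decide), if_neg (by rw [h2]; decide)]
          constructor <;> rintro ⟨a, b, c⟩ <;> exact ⟨a, by omega, by omega⟩
        · rw [if_neg h2]
          by_cases h3 : s[i] = '('
          · rw [if_pos h3, hrec,
              pvRules_shift s i (hvac '(' h3 (by decide)),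
              pvCount_step s i hi '[', pvCount_step s i hi ']',
              pvCount_step s i hi '(', pvCount_step s i hi ')']
            rw [if_neg h1, if_neg h2, if_pos h3, if_neg (by rw [h3]; decide)]
            constructor <;> rintro ⟨a, b, c⟩ <;> exact ⟨a, by omega, by omega⟩
          · rw [if_neg h3]
            by_cases h4 : s[i] = ')'
            · rw [if_pos h4, hrec,
                pvRules_shift s i (hvac ')' h4 (by decide)),
                pvCount_step s i hi '[', pvCount_step s i hi ']',
                pvCount_step s i hi '(', pvCount_step s i hi ')']
              rw [if_neg h1, if_neg h2, if_neg h3, if_pos h4]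
              constructor <;> rintro ⟨a, b, c⟩ <;> exact ⟨a, by omega, by omega⟩
            · rw [if_neg h4]
              by_cases h5 : s[i] = '&' ∨ s[i] = '|'
              · rw [if_pos h5]
                simp only [dite_eq_ite, pvSkipWsB_eq]
                by_cases hch : pvCheck s (if i + 1 < s.length ∧ s[i+1]? = some s[i] then i + 2 else i + 1)
                · rw [if_neg (by rcases hch with ⟨hl, hg⟩; push_neg; exact ⟨hl, hg⟩), hrec,
                    pvRules_shift s i (by
                      intro c hc2 hop
                      rw [List.getElem?_eq_getElem hi] at hc2
                      injection hc2 with e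
                      rw [← e]
                      exact hch),
                    hns '[' h1, hns ']' h2, hns '(' h3, hns ')' h4]
                · rw [if_pos (by
                    by_contra hcon
                    push_neg at hcon
                    exact hch ⟨hcon.1, hcon.2⟩)]
                  simp only [Bool.false_eq_true, false_iff]
                  rintro ⟨H, -, -⟩
                  exact hch (H i le_rfl s[i] (List.getElem?_eq_getElem hi) h5)
              · rw [if_neg h5, hrec,
                  pvRules_shift s i (by
                    intro c hc2 hop
                    rw [List.getElem?_eq_getElem hi] at hc2
                    injection hc2 with e
                    rw [← e] at hop
                    exact absurd hop h5),
                  hns '[' h1, hns ']' h2, hns '(' h3, hns ')' h4]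
    · simp only [dif_neg hi]
      have hd : s.drop i = [] := List.drop_of_length_le (by omega)
      simp only [hd, List.count_nil]
      constructor
      · intro hb
        simp only [Bool.and_eq_true, decide_eq_true_eq] at hb
        exact ⟨fun p hp c hpc hc =>
          absurd hpc (by simp [List.getElem?_eq_none (by omega : s.length ≤ p)]),
          by push_cast; omega, by push_cast; omega⟩
      · rintro ⟨-, b1, b2⟩
        simp only [Bool.and_eq_true, decide_eq_true_eq]
        push_cast at b1 b2
        exact ⟨by omega, by omega⟩

theorem pvCount_go_one (c : Char) : ∀ fuel l acc, l.length ≤ fuel →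
    PySem.Chars.count.go [c] fuel l acc = acc + l.count c := by
  intro fuel
  induction fuel with
  | zero =>
    intro l acc h
    have hl : l = [] := List.eq_nil_of_length_eq_zero (by omega)
    subst hl
    simp [PySem.Chars.count.go]
  | succ fuel ih =>
    intro l acc h
    cases l with
    | nil => simp [PySem.Chars.count.go]
    | cons x t =>
      rw [PySem.Chars.count.go]
      by_cases hx : c = x
      · subst hx
        simp only [List.isPrefixOf, beq_self_eq_true, Bool.true_and, List.isPrefixOf_nil_left,
          if_true, List.length_cons, List.length_nil, List.drop_succ_cons, List.drop_zero]
        rw [ih t (acc + 1) (by simpa using h)]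
        simp [List.count_cons]
        omega
      · simp only [List.isPrefixOf, beq_iff_eq, hx, Bool.false_and, if_false,
          Bool.and_eq_true, decide_eq_true_eq, false_and, if_neg]
        rw [ih t acc (by simpa using h)]
        simp [List.count_cons, hx]
        exact fun e => hx e.symm

theorem pvCount_one (s : List Char) (c : Char) : PySem.Chars.count s [c] = s.count c := by
  unfold PySem.Chars.count
  simp [pvCount_go_one c s.length s 0 le_rfl]

theorem pvPair_of_rules (s : List Char) (c : Char) (hc : c = '&' ∨ c = '|')
    (H : pvRulesOKs s 0) : pvPairOKs s c 0 := by
  intro p hp hpre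
  obtain ⟨h1, h2⟩ := (pvPrefix_two_drop s p c).mp hpre
  rcases List.getElem?_eq_some_iff.mp h2 with ⟨hlt, -⟩
  have := H p (by omega) c h1 hc
  rwa [if_pos ⟨hlt, h2⟩] at this

theorem pvLone_of_rules (s : List Char) (c : Char) (hc : c = '&' ∨ c = '|')
    (H : pvRulesOKs s 0) : pvLoneOKs s c 0 := by
  intro p hp hpc hnp
  have := H p (by omega) c hpc hc
  rwa [if_neg (fun hcon => hnp ((pvPrefix_two_drop s p c).mpr ⟨hpc, hcon.2⟩))] at this

theorem pvRules_split (s : List Char) :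
    pvRulesOKs s 0 ↔ (pvPairOKs s '&' 0 ∧ pvPairOKs s '|' 0 ∧ pvLoneOKs s '&' 0 ∧ pvLoneOKs s '|' 0) := by
  constructor
  · intro H
    exact ⟨pvPair_of_rules s '&' (Or.inl rfl) H, pvPair_of_rules s '|' (Or.inr rfl) H,
      pvLone_of_rules s '&' (Or.inl rfl) H, pvLone_of_rules s '|' (Or.inr rfl) H⟩
  · rintro ⟨hpa, hpo, hla, hlo⟩
    intro p hp c hpc hc
    by_cases hcond : p + 1 < s.length ∧ s[p + 1]? = some c
    · rw [if_pos hcond]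
      have hpair : [c, c] <+: s.drop p := (pvPrefix_two_drop s p c).mpr ⟨hpc, hcond.2⟩
      rcases hc with rfl | rfl
      · exact hpa p (by omega) hpair
      · exact hpo p (by omega) hpair
    · rw [if_neg hcond]
      have hnp : ¬ [c, c] <+: s.drop p := by
        intro h2
        obtain ⟨-, h2'⟩ := (pvPrefix_two_drop s p c).mp h2
        rcases List.getElem?_eq_some_iff.mp h2' with ⟨hlt, -⟩
        exact hcond ⟨hlt, h2'⟩
      rcases hc with rfl | rfl
      · exact hla p (by omega) hpc hnp
      · exact hlo p (by omega) hpc hnp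

-- ===== VERDICT (by name: the statement is the Claim_ definition above) =====
theorem validate_expression_format_spec : Claim_equal_validate_expression_format := by
  unfold Claim_equal_validate_expression_format
  intro exp _
  unfold Spec_validate_expression_format
  simp only [validate_expression_format, validate_expression_format_alt]
  set s := exp.toList with hs
  rw [Bool.eq_iff_iff]
  rw [pvBLoop_spec s (s.length + 1) 0 0 0 (by omega)]
  split_ifs with hB hP
  · simp only [Bool.false_eq_true, false_iff]
    rintro ⟨-, hb, -⟩
    rw [pvCount_one, pvCount_one] at hB
    simp only [List.drop_zero] at hb
    exact hB (by omega)
  · simp only [Bool.false_eq_true, false_iff]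
    rintro ⟨-, -, hp⟩
    rw [pvCount_one, pvCount_one] at hP
    simp only [List.drop_zero] at hp
    exact hP (by omega)
  · have hB' : PySem.Chars.count s ['['] = PySem.Chars.count s [']'] := not_ne_iff.mp hB
    have hP' : PySem.Chars.count s ['('] = PySem.Chars.count s [')'] := not_ne_iff.mp hP
    rw [pvCount_one, pvCount_one] at hB' hP'
    simp only [List.all_cons, List.all_nil, Bool.and_true, Bool.and_eq_true]
    rw [pvALoop_pair s '&' (Or.inl rfl) (s.length + 1) 0 (by omega),
      pvALoop_pair s '|' (Or.inr rfl) (s.length + 1) 0 (by omega),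
      pvALoop_lone s '&' (Or.inl rfl) (s.length + 1) 0 (by omega),
      pvALoop_lone s '|' (Or.inr rfl) (s.length + 1) 0 (by omega)]
    constructor
    · rintro ⟨hpa, hpo, hla, hlo⟩
      refine ⟨(pvRules_split s).mpr ⟨hpa, hpo, hla, hlo⟩, ?_, ?_⟩
      · simp only [List.drop_zero]; omega
      · simp only [List.drop_zero]; omega
    · rintro ⟨hR, -, -⟩
      obtain ⟨hpa, hpo, hla, hlo⟩ := (pvRules_split s).mp hR
      exact ⟨hpa, hpo, hla, hlo⟩
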